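-- pv_equiv track=rewrite | github.com/sontungdt7/ClawPunks | scripts/validate_all_nfts.py | get_traits
-- ===== SOURCE A (Python) =====
-- def get_traits(token_id: int) -> tuple[int, int, int]:
--     """Replicate contract _getTraits. Returns (bgIdx, bodyIdx, eyeIdx)."""
--     bg_idx = token_id % 23
--     body_idx = (token_id // 23) % 23
--     # Eye: pick from 22 colors excluding bodyIdx. Ensures eye != body and uniqueness.
--     eye_slot = (token_id // 529) % 22
--     eye_idx = 0
--     count = 0
--     for c in range(23):
--         if c != body_idx:
--             if count == eye_slot:
--                 eye_idx = c
--                 break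
--             count += 1
--     return (bg_idx, body_idx, eye_idx)
-- ===== SOURCE B (Python) =====
-- def get_traits(token_id: int) -> tuple[int, int, int]:
--     bg_idx = token_id % 23
--     body_idx = (token_id // 23) % 23
--     eye_slot = (token_id // 529) % 22
--     eye_idx = eye_slot if eye_slot < body_idx else eye_slot + 1
--     return (bg_idx, body_idx, eye_idx)
-- ===== Notes on version B (the rewrite author's own statement) =====
-- stated objective: simpler
-- what changed: Replaced the counting loop that skips body_idx with the closed form eye_idx = eye_slot if eye_slot < body_idx else eye_slot + 1.
import Mathlib
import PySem

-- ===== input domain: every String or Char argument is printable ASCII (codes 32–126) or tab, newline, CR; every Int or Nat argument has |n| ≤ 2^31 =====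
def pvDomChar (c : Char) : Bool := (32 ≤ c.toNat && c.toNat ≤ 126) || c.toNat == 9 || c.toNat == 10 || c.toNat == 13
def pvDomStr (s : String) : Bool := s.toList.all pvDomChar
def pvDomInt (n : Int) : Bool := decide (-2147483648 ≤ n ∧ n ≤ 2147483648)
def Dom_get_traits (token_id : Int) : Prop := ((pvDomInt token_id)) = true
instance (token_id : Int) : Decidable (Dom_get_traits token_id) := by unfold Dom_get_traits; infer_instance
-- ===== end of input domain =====

-- B replaces A's 23-step counting loop by the closed form eye = slot (+1 past body_idx); simpler, no loop.


-- ===== PORT A =====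
-- the 'for c in range(23)' loop with break: recursion over the range list, state (count, eye_idx)
def eyeLoop (bodyIdx eyeSlot : Int) : List Int → Int → Int → Int
  | [], _, eyeIdx => eyeIdx
  | c :: rest, count, eyeIdx =>
    if c ≠ bodyIdx then
      if count = eyeSlot then c
      else eyeLoop bodyIdx eyeSlot rest (count + 1) eyeIdx
    else eyeLoop bodyIdx eyeSlot rest count eyeIdx

def get_traits (token_id : Int) : Int × Int × Int :=
  let bg_idx := PySem.Int.mod token_id 23
  let body_idx := PySem.Int.mod (PySem.Int.floordiv token_id 23) 23
  let eye_slot := PySem.Int.mod (PySem.Int.floordiv token_id 529) 22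
  (bg_idx, body_idx, eyeLoop body_idx eye_slot (PySem.List.pyRange 0 23 1) 0 0)

-- ===== PORT B =====
def get_traits_alt (token_id : Int) : Int × Int × Int :=
  let bg_idx := PySem.Int.mod token_id 23
  let body_idx := PySem.Int.mod (PySem.Int.floordiv token_id 23) 23
  let eye_slot := PySem.Int.mod (PySem.Int.floordiv token_id 529) 22
  let eye_idx := if eye_slot < body_idx then eye_slot else eye_slot + 1
  (bg_idx, body_idx, eye_idx)

-- ===== PRECONDITION & SPEC =====
def Spec_get_traits (token_id : Int) (out : Int × Int × Int) : Prop := out = get_traits_alt token_id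
instance (token_id : Int) (out : Int × Int × Int) : Decidable (Spec_get_traits token_id out) := by unfold Spec_get_traits; infer_instance

-- ===== CLAIM (what is proved, stated in full; the proofs are below) =====
def Claim_equal_get_traits : Prop := ∀ (token_id : Int), Dom_get_traits token_id → Spec_get_traits token_id (get_traits token_id)

-- ===== LEMMAS AND PROOFS =====
theorem eyeLoop_closed (b e : Int) (hb : 0 ≤ b ∧ b < 23) (he : 0 ≤ e ∧ e < 22) :
    eyeLoop b e (PySem.List.pyRange 0 23 1) 0 0 = if e < b then e else e + 1 := by
  obtain ⟨hb0, hb1⟩ := hb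
  obtain ⟨he0, he1⟩ := he
  lift b to ℕ using hb0 with bn
  lift e to ℕ using he0 with en
  have hbn : bn < 23 := by exact_mod_cast hb1
  have hen : en < 22 := by exact_mod_cast he1
  have key : ∀ bn : Fin 23, ∀ en : Fin 22,
      eyeLoop (bn : Int) (en : Int) (PySem.List.pyRange 0 23 1) 0 0 =
        if (en : Int) < (bn : Int) then (en : Int) else (en : Int) + 1 := by decide
  exact key ⟨bn, hbn⟩ ⟨en, hen⟩

theorem get_traits_spec' (token_id : Int) : get_traits token_id = get_traits_alt token_id := by
  unfold get_traits get_traits_alt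
  simp only []
  have hb : 0 ≤ PySem.Int.mod (PySem.Int.floordiv token_id 23) 23 ∧
      PySem.Int.mod (PySem.Int.floordiv token_id 23) 23 < 23 := by
    rw [PySem.Int.mod_eq_emod_of_pos (by norm_num)]
    exact ⟨Int.emod_nonneg _ (by norm_num), Int.emod_lt_of_pos _ (by norm_num)⟩
  have he : 0 ≤ PySem.Int.mod (PySem.Int.floordiv token_id 529) 22 ∧
      PySem.Int.mod (PySem.Int.floordiv token_id 529) 22 < 22 := by
    rw [PySem.Int.mod_eq_emod_of_pos (by norm_num)]
    exact ⟨Int.emod_nonneg _ (by norm_num), Int.emod_lt_of_pos _ (by norm_num)⟩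
  exact congrArg _ (congrArg _ (eyeLoop_closed _ _ hb he))

-- ===== VERDICT (by name: the statement is the Claim_ definition above) =====
theorem get_traits_spec : Claim_equal_get_traits := by
  intro t _
  exact get_traits_spec' t
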